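-- pv_equiv track=rewrite | github.com/brandonneth/MiniModeling | automating.py | all_constraints
-- ===== SOURCE A (Python) =====
-- import itertools
--
-- def permutation_to_name(perm):
-- 	strs = [str(i) for i in perm]
-- 	return "_".join(strs)
--
-- def comp_layout_variable_name(computation_number, array_name, layout_perm):
-- 	perm_string = permutation_to_name(layout_perm)
-- 	return str(array_name) + "_" + str(computation_number) + "_" + perm_string
--
-- def conv_layout_variable_name(computation_number, array_name, input_perm, output_perm):
-- 	p1 = permutation_to_name(input_perm)
-- 	p2 = permutation_to_name(output_perm)
--
-- 	return 'conv_' + str(array_name) + "_" + str(computation_number) + "_" + p1 + "_to_" + p2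
--
-- def computation_layout_variable_names(computation_number, array_name, array_dimensionality):
-- 	dim_index_tuple = tuple(range(0,array_dimensionality))
-- 	layout_permutations = list(itertools.permutations(dim_index_tuple))
--
--
--
-- 	variable_names = [comp_layout_variable_name(computation_number, array_name, perm) for perm in layout_permutations]
-- 	return variable_names
--
-- def conversion_layout_variable_names(computation_number, array_name, array_dimensionality):
-- 	dim_index_tuple = tuple(range(0,array_dimensionality))
-- 	layout_permutations = list(itertools.permutations(dim_index_tuple))
--
-- 	layout_pairs = itertools.product(layout_permutations, layout_permutations)
--
-- 	variable_names = [conv_layout_variable_name(computation_number, array_name, p[0], p[1]) for p in layout_pairs]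
-- 	return variable_names
--
-- def one_layout_per_computation(computation_number, array_name, array_dimensionality):
--
-- 	variables = computation_layout_variable_names(computation_number, array_name, array_dimensionality)
--
-- 	variable_sum = " + ".join(variables)
--
-- 	return [variable_sum + " == 1"]
--
-- def one_conversion_per_conversion(computation_number, array_name, array_dimensionality):
-- 	variables = conversion_layout_variable_names(computation_number, array_name, array_dimensionality)
--
-- 	variable_sum = " + ".join(variables)
--
-- 	return [variable_sum + " == 1"]
--
-- def computation_conversion_matching(computation_number, array_name, array_dimensionality):
--
-- 	dim_index_tuple = tuple(range(0,array_dimensionality))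
-- 	layout_permutations = list(itertools.permutations(dim_index_tuple))
--
--
-- 	constraints = []
-- 	for layout in layout_permutations:
-- 		comp_layout_variable = comp_layout_variable_name(computation_number, array_name, layout)
--
-- 		conv_input_variables = [conv_layout_variable_name(computation_number, array_name, layout, l) for l in layout_permutations]
--
-- 		conv_sum = " + ".join(conv_input_variables)
--
-- 		constraints += [comp_layout_variable + " == " + conv_sum]
-- 	return constraints
--
-- def conversion_computation_matching(conversion_number, array_name, array_dimensionality):
--
-- 	dim_index_tuple = tuple(range(0,array_dimensionality))
-- 	layout_permutations = list(itertools.permutations(dim_index_tuple))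
--
--
-- 	constraints = []
-- 	for layout in layout_permutations:
-- 		comp_layout_variable = comp_layout_variable_name(conversion_number+1, array_name, layout)
--
-- 		conv_input_variables = [conv_layout_variable_name(conversion_number, array_name, l, layout) for l in layout_permutations]
--
-- 		conv_sum = " + ".join(conv_input_variables)
--
-- 		constraints += [comp_layout_variable + " == " + conv_sum]
-- 	return constraints
--
-- def nonnegative(computation_number, array_name, array_dimensionality):
-- 	variables = computation_layout_variable_names(computation_number, array_name, array_dimensionality)
-- 	variables += conversion_layout_variable_names(computation_number, array_name, array_dimensionality)
--
-- 	return [v + " >= 0" for v in variables]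
--
-- def all_constraints(num_computations, name_dim_pairs):
-- 	constraints = []
-- 	for comp_num in range(0, num_computations):
-- 		for (name,dim) in name_dim_pairs:
-- 			constraints += one_layout_per_computation(comp_num, name, dim)
-- 			constraints += one_conversion_per_conversion(comp_num, name, dim)
-- 			constraints += computation_conversion_matching(comp_num, name, dim)
-- 			if comp_num != num_computations - 1:
-- 				constraints += conversion_computation_matching(comp_num, name, dim)
-- 			constraints += nonnegative(comp_num, name, dim)
-- 	return constraints
-- ===== SOURCE B (Python) =====
-- # One pass per (computation, array): the permutation name strings are computed once
-- # and a single traversal accumulates every block at the same time.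
--
-- def _perms(xs):
--     if not xs:
--         return [[]]
--     out = []
--     for i in range(len(xs)):
--         rest = xs[:i] + xs[i + 1:]
--         out += [[xs[i]] + p for p in _perms(rest)]
--     return out
--
--
-- def _perm_names(dim):
--     return ["_".join(str(i) for i in p) for p in _perms(list(range(dim)))]
--
--
-- def all_constraints(num_computations, name_dim_pairs):
--     constraints = []
--     for comp_num in range(num_computations):
--         last = comp_num == num_computations - 1
--         for name, dim in name_dim_pairs:
--             pnames = _perm_names(dim)
--             comp_vars = []
--             conv_vars = []
--             cc_eqs = []
--             vc_eqs = []
--             for p in pnames: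
--                 cv = name + "_" + str(comp_num) + "_" + p
--                 row = ["conv_" + name + "_" + str(comp_num) + "_" + p + "_to_" + q for q in pnames]
--                 comp_vars.append(cv)
--                 conv_vars += row
--                 cc_eqs.append(cv + " == " + " + ".join(row))
--                 if not last:
--                     col = ["conv_" + name + "_" + str(comp_num) + "_" + q + "_to_" + p for q in pnames]
--                     vc_eqs.append(name + "_" + str(comp_num + 1) + "_" + p + " == " + " + ".join(col))
--             constraints.append(" + ".join(comp_vars) + " == 1")
--             constraints.append(" + ".join(conv_vars) + " == 1")
--             constraints += cc_eqs
--             constraints += vc_eqs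
--             constraints += [v + " >= 0" for v in comp_vars]
--             constraints += [v + " >= 0" for v in conv_vars]
--     return constraints
-- ===== Notes on version B (the rewrite author's own statement) =====
-- stated objective: alternative
-- what changed: B computes the permutation name strings once per (computation, array) pair and accumulates all four constraint families (layout vars, conversion vars, comp-conv equalities, conv-comp equalities) in a single traversal of the permutations, instead of A's five independent helpers that each regenerate and rescan the permutation list.
import Mathlib
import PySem

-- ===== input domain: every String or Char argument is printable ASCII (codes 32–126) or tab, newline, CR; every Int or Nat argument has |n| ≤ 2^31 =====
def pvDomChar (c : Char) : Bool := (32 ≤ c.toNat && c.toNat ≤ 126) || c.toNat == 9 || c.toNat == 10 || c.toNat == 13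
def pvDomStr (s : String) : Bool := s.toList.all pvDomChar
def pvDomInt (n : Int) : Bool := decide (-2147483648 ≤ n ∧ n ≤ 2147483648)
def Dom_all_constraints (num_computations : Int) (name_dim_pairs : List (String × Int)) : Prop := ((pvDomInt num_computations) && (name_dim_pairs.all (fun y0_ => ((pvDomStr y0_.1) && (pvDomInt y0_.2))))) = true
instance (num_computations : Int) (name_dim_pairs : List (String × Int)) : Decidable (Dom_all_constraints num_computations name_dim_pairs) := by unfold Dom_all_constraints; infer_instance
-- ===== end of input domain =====

-- B computes the permutation-name strings once per (computation, array) and builds every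
-- constraint block in a single traversal of them, replacing A's separate per-block rescans
-- of the permutation list (objective: alternative decomposition, same exact output).


-- ===== PORT A =====
def permutation_to_name (perm : List Int) : String :=
  PySem.Str.join "_" (perm.map (fun i => PySem.Int.toStr i))

def comp_layout_variable_name (computation_number : Int) (array_name : String) (layout_perm : List Int) : String :=
  array_name ++ "_" ++ PySem.Int.toStr computation_number ++ "_" ++ permutation_to_name layout_perm

def conv_layout_variable_name (computation_number : Int) (array_name : String) (input_perm output_perm : List Int) : String :=
  "conv_" ++ array_name ++ "_" ++ PySem.Int.toStr computation_number ++ "_" ++ permutation_to_name input_perm ++ "_to_" ++ permutation_to_name output_perm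

def layout_permutations_of (array_dimensionality : Int) : List (List Int) :=
  PySem.List.permutations (PySem.List.pyRange 0 array_dimensionality) (PySem.List.pyRange 0 array_dimensionality).length

def computation_layout_variable_names (computation_number : Int) (array_name : String) (array_dimensionality : Int) : List String :=
  (layout_permutations_of array_dimensionality).map (fun perm => comp_layout_variable_name computation_number array_name perm)

def conversion_layout_variable_names (computation_number : Int) (array_name : String) (array_dimensionality : Int) : List String :=
  -- itertools.product(perms, perms) traversed row-major
  (layout_permutations_of array_dimensionality).flatMap (fun p1 =>
    (layout_permutations_of array_dimensionality).map (fun p2 =>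
      conv_layout_variable_name computation_number array_name p1 p2))

def one_layout_per_computation (computation_number : Int) (array_name : String) (array_dimensionality : Int) : List String :=
  [PySem.Str.join " + " (computation_layout_variable_names computation_number array_name array_dimensionality) ++ " == 1"]

def one_conversion_per_conversion (computation_number : Int) (array_name : String) (array_dimensionality : Int) : List String :=
  [PySem.Str.join " + " (conversion_layout_variable_names computation_number array_name array_dimensionality) ++ " == 1"]

def computation_conversion_matching (computation_number : Int) (array_name : String) (array_dimensionality : Int) : List String :=
  (layout_permutations_of array_dimensionality).foldl (fun constraints layout =>
    constraints ++ [comp_layout_variable_name computation_number array_name layout ++ " == " ++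
      PySem.Str.join " + " ((layout_permutations_of array_dimensionality).map (fun l =>
        conv_layout_variable_name computation_number array_name layout l))]) []

def conversion_computation_matching (conversion_number : Int) (array_name : String) (array_dimensionality : Int) : List String :=
  (layout_permutations_of array_dimensionality).foldl (fun constraints layout =>
    constraints ++ [comp_layout_variable_name (conversion_number + 1) array_name layout ++ " == " ++
      PySem.Str.join " + " ((layout_permutations_of array_dimensionality).map (fun l =>
        conv_layout_variable_name conversion_number array_name l layout))]) []

def nonnegative (computation_number : Int) (array_name : String) (array_dimensionality : Int) : List String :=
  (computation_layout_variable_names computation_number array_name array_dimensionality ++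
   conversion_layout_variable_names computation_number array_name array_dimensionality).map (fun v => v ++ " >= 0")

def all_constraints (num_computations : Int) (name_dim_pairs : List (String × Int)) : List String :=
  (PySem.List.pyRange 0 num_computations).foldl (fun constraints comp_num =>
    name_dim_pairs.foldl (fun constraints nd =>
      let c1 := constraints ++ one_layout_per_computation comp_num nd.1 nd.2
      let c2 := c1 ++ one_conversion_per_conversion comp_num nd.1 nd.2
      let c3 := c2 ++ computation_conversion_matching comp_num nd.1 nd.2
      let c4 := if comp_num ≠ num_computations - 1 then c3 ++ conversion_computation_matching comp_num nd.1 nd.2 else c3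
      c4 ++ nonnegative comp_num nd.1 nd.2) constraints) []

-- ===== PORT B =====
-- _perms: for i in range(len(xs)): out += [[xs[i]] + p for p in _perms(xs[:i] + xs[i+1:])]
-- (structural recursion with fuel = length, which is exactly where the Python recursion bottoms out)
def permsB : Nat → List Int → List (List Int)
  | 0, _ => [[]]
  | n + 1, xs => (List.range xs.length).flatMap (fun i =>
      ((permsB n (xs.take i ++ xs.drop (i + 1))).map (fun p => xs.getD i 0 :: p)))

def permNamesB (dim : Int) : List String :=
  let xs := PySem.List.pyRange 0 dim    -- list(range(dim))
  (permsB xs.length xs).map (fun p => PySem.Str.join "_" (p.map (fun i => PySem.Int.toStr i)))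

def all_constraints_alt (num_computations : Int) (name_dim_pairs : List (String × Int)) : List String :=
  (PySem.List.pyRange 0 num_computations).foldl (fun out comp_num =>
    let last := comp_num == num_computations - 1
    name_dim_pairs.foldl (fun out nd =>
      let name := nd.1
      let pnames := permNamesB nd.2
      let st := pnames.foldl (fun (st : List String × List String × List String × List String) p =>
        let cv := name ++ "_" ++ PySem.Int.toStr comp_num ++ "_" ++ p
        let row := pnames.map (fun q => "conv_" ++ name ++ "_" ++ PySem.Int.toStr comp_num ++ "_" ++ p ++ "_to_" ++ q)
        (st.1 ++ [cv],
         st.2.1 ++ row,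
         st.2.2.1 ++ [cv ++ " == " ++ PySem.Str.join " + " row],
         if last then st.2.2.2 else
           st.2.2.2 ++ [name ++ "_" ++ PySem.Int.toStr (comp_num + 1) ++ "_" ++ p ++ " == " ++
             PySem.Str.join " + " (pnames.map (fun q => "conv_" ++ name ++ "_" ++ PySem.Int.toStr comp_num ++ "_" ++ q ++ "_to_" ++ p))]))
        ([], [], [], [])
      out ++ [PySem.Str.join " + " st.1 ++ " == 1"] ++ [PySem.Str.join " + " st.2.1 ++ " == 1"] ++
        st.2.2.1 ++ st.2.2.2 ++ st.1.map (fun v => v ++ " >= 0") ++ st.2.1.map (fun v => v ++ " >= 0")) out) []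

-- ===== PRECONDITION & SPEC =====
def Spec_all_constraints (num_computations : Int) (name_dim_pairs : List (String × Int)) (out : List String) : Prop := out = all_constraints_alt num_computations name_dim_pairs
instance (num_computations : Int) (name_dim_pairs : List (String × Int)) (out : List String) : Decidable (Spec_all_constraints num_computations name_dim_pairs out) := by unfold Spec_all_constraints; infer_instance

-- ===== CLAIM (what is proved, stated in full; the proofs are below) =====
def Claim_equal_all_constraints : Prop := ∀ (num_computations : Int) (name_dim_pairs : List (String × Int)), Dom_all_constraints num_computations name_dim_pairs → Spec_all_constraints num_computations name_dim_pairs (all_constraints num_computations name_dim_pairs)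

-- ===== LEMMAS AND PROOFS =====

-- B's permutation generator agrees with itertools.permutations at full length.
theorem permsB_eq_permutations : ∀ (n : Nat) (xs : List Int), xs.length = n →
    permsB n xs = PySem.List.permutations xs n := by
  intro n
  induction n with
  | zero =>
    intro xs h
    rw [List.length_eq_zero_iff] at h; subst h
    simp [permsB, PySem.List.permutations]
  | succ n ih =>
    intro xs h
    rw [permsB, PySem.List.permutations]
    apply List.flatMap_congr
    intro i hi
    rw [List.mem_range] at hi
    rw [← List.eraseIdx_eq_take_drop_succ,
        ih (xs.eraseIdx i) (by rw [List.length_eraseIdx_of_lt (by omega)]; omega)]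
    have hsome : xs[i]? = some xs[i] := List.getElem?_eq_getElem (by omega)
    simp [hsome, List.getD]

theorem permNamesB_eq (dim : Int) :
    permNamesB dim = (layout_permutations_of dim).map permutation_to_name := by
  simp only [permNamesB, layout_permutations_of, permsB_eq_permutations _ _ rfl]
  rfl

-- the one-pass accumulator of B, characterised block by block
theorem foldl_quad {α : Type} (cvf : α → String) (rowf : α → List String) (ccf : α → String)
    (vcf : α → String) (last : Bool) :
    ∀ (L : List α) (a b c d : List String),
      L.foldl (fun st p => (st.1 ++ [cvf p], st.2.1 ++ rowf p, st.2.2.1 ++ [ccf p],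
          if last then st.2.2.2 else st.2.2.2 ++ [vcf p])) (a, b, c, d)
      = (a ++ L.map cvf, b ++ L.flatMap rowf, c ++ L.map ccf,
         if last then d else d ++ L.map vcf) := by
  intro L
  induction L with
  | nil => intro a b c d; simp
  | cons x L ih =>
    intro a b c d
    rw [List.foldl_cons, ih]
    cases last <;> simp

-- ===== VERDICT (by name: the statement is the Claim_ definition above) =====
theorem all_constraints_spec : Claim_equal_all_constraints := by
  intro nc pairs _
  unfold Spec_all_constraints all_constraints all_constraints_alt
  congr 1
  funext constraints comp_num
  simp only []
  congr 1
  funext out nd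
  rw [foldl_quad]
  simp only [permNamesB_eq, List.nil_append]
  unfold one_layout_per_computation one_conversion_per_conversion
    computation_conversion_matching conversion_computation_matching nonnegative
    computation_layout_variable_names conversion_layout_variable_names
    comp_layout_variable_name conv_layout_variable_name
  rw [PySem.List.foldl_append_singleton_eq_map, PySem.List.foldl_append_singleton_eq_map]
  by_cases h : comp_num = nc - 1 <;>
    simp [h, List.map_map, List.flatMap_map, List.map_append, List.append_assoc, Function.comp_def]
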